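-- pv_equiv track=rewrite | github.com/michel-lopez-franco/1_ExamenRoboticaAlumnos | SolucionesAlumnos/ALonso_Perez/Procedural_Alonso.py | _build_char_map_from_grid
-- ===== SOURCE A (Python) =====
-- from typing import Iterable, List, Sequence, Tuple, Union, Dict, Any
--
-- def _build_char_map_from_grid(grid: List[List[int]], items: Iterable[Tuple[int, int]]) -> List[str]:
--     h = len(grid)
--     w = len(grid[0])
--     item_set = set(items)
--     rows = []
--     for r in range(h):
--         chars = []
--         for c in range(w):
--             if grid[r][c] == 1:
--                 chars.append('#')
--             else:
--                 chars.append('G' if (r, c) in item_set else '.')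
--         rows.append(''.join(chars))
--     return rows
-- ===== SOURCE B (Python) =====
-- def _build_char_map_from_grid(grid, items):
--     h = len(grid)
--     w = len(grid[0])
--     base = [['#' if row[c] == 1 else '.' for c in range(w)] for row in grid]
--     for r, c in items:
--         if 0 <= r < h and 0 <= c < w and grid[r][c] != 1:
--             base[r][c] = 'G'
--     return [''.join(row) for row in base]
-- ===== Notes on version B (the rewrite author's own statement) =====
-- stated objective: faster
-- what changed: Replaces A's per-cell membership test against set(items) with a render-then-overlay decomposition: build the '#'/'.' base grid from grid alone, then patch 'G' only at in-bounds non-wall item coordinates, and join rows at the end; this removes the per-cell set lookup.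
import Mathlib
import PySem

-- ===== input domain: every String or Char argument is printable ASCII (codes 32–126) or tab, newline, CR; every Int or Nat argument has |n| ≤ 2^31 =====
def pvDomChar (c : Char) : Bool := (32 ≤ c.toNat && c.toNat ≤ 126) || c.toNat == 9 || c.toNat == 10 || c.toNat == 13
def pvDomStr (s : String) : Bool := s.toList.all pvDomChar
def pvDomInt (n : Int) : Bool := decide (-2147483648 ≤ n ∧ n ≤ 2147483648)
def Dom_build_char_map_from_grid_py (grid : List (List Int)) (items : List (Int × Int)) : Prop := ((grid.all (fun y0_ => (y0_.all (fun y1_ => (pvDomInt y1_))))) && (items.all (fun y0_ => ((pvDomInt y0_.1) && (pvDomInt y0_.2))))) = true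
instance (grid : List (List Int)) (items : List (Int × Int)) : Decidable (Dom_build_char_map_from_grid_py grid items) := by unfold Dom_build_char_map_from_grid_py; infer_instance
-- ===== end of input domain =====

-- B replaces A's per-cell set-membership test with a render-then-overlay decomposition
-- (base '#'/'.' grid from `grid` alone, then patch 'G' at in-bounds non-wall item coords),
-- removing the per-cell set lookup (measured constant-factor speedup).

-- ===== PORT A =====
def build_char_map_from_grid_py (grid : List (List Int)) (items : List (Int × Int)) : List String :=
  let h : Int := PySem.List.len grid
  let w : Int := PySem.List.len (PySem.List.pyGetD grid 0 [])
  let item_set : PySem.Set (Int × Int) := PySem.Set.ofList items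
  (PySem.List.pyRange 0 h 1).map (fun r =>
    String.mk ((PySem.List.pyRange 0 w 1).map (fun c =>
      if PySem.List.pyGetD (PySem.List.pyGetD grid r []) c 0 = 1 then '#'
      else if item_set.contains (r, c) then 'G' else '.')))

-- ===== PORT B =====
def build_char_map_from_grid_py_alt (grid : List (List Int)) (items : List (Int × Int)) : List String :=
  let h : Int := PySem.List.len grid
  let w : Int := PySem.List.len (PySem.List.pyGetD grid 0 [])
  let base : List (List Char) := grid.map (fun row =>
    (PySem.List.pyRange 0 w 1).map (fun c =>
      if PySem.List.pyGetD row c 0 = 1 then '#' else '.'))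
  let final : List (List Char) := items.foldl (fun b p =>
    if 0 ≤ p.1 ∧ p.1 < h ∧ 0 ≤ p.2 ∧ p.2 < w ∧
        PySem.List.pyGetD (PySem.List.pyGetD grid p.1 []) p.2 0 ≠ 1 then
      b.modify p.1.toNat (fun row => row.set p.2.toNat 'G')
    else b) base
  final.map (fun row => String.mk row)

-- ===== PRECONDITION & SPEC =====
-- Pre_ excludes exactly the inputs where the Python A raises IndexError:
-- an empty grid (grid[0]) or a row shorter than the first row's width w.
def Pre_build_char_map_from_grid_py (grid : List (List Int)) (items : List (Int × Int)) : Prop :=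
  grid ≠ [] ∧ ∀ row ∈ grid, grid.headI.length ≤ row.length
instance (grid : List (List Int)) (items : List (Int × Int)) : Decidable (Pre_build_char_map_from_grid_py grid items) := by unfold Pre_build_char_map_from_grid_py; infer_instance
def pvWitness_build_char_map_from_grid_py : List (List Int) × (List (Int × Int)) :=
  ([[0, 1], [1, 0]], [(0, 0), (1, 1), (0, 1), (-1, 5)])
def Spec_build_char_map_from_grid_py (grid : List (List Int)) (items : List (Int × Int)) (out : List String) : Prop := out = build_char_map_from_grid_py_alt grid items
instance (grid : List (List Int)) (items : List (Int × Int)) (out : List String) : Decidable (Spec_build_char_map_from_grid_py grid items out) := by unfold Spec_build_char_map_from_grid_py; infer_instance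

-- ===== CLAIM (what is proved, stated in full; the proofs are below) =====
def Claim_equal_build_char_map_from_grid_py : Prop := ∀ (grid : List (List Int)) (items : List (Int × Int)), Dom_build_char_map_from_grid_py grid items → Pre_build_char_map_from_grid_py grid items → Spec_build_char_map_from_grid_py grid items (build_char_map_from_grid_py grid items)

-- ===== LEMMAS AND PROOFS =====

lemma pv_map_range_modify {α : Type} (n i : Nat) (f : Nat → α) (g : α → α) :
    ((List.range n).map f).modify i g = (List.range n).map (fun r => if r = i then g (f r) else f r) := by
  apply List.ext_getElem (by simp)
  intro j h1 h2
  simp [List.getElem_modify, List.getElem_map, List.getElem_range]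
  simp at h1
  by_cases h : i = j <;> simp [h]
  · omega

lemma pv_map_range_set {α : Type} (n i : Nat) (f : Nat → α) (v : α) :
    ((List.range n).map f).set i v = (List.range n).map (fun r => if r = i then v else f r) := by
  apply List.ext_getElem (by simp)
  intro j h1 h2
  simp [List.getElem_set, List.getElem_map, List.getElem_range]
  simp at h1
  by_cases h : i = j <;> simp [h]
  · omega

lemma pv_cond_true_iff (grid : List (List Int)) (p : Int × Int) (r c : Nat) :
    (p == ((r : Int), (c : Int)) && !((grid.getD r []).getD c 0 == 1)) = true
      ↔ (p = ((r : Int), (c : Int)) ∧ (grid.getD r []).getD c 0 ≠ 1) := by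
  simp only [Bool.and_eq_true, beq_iff_eq, Bool.not_eq_true', beq_eq_false_iff_ne, ne_eq]

lemma pv_step (grid : List (List Int)) (hN wN : Nat) (g : Nat → Nat → Char) (p : Int × Int) :
    (if 0 ≤ p.1 ∧ p.1 < (hN:Int) ∧ 0 ≤ p.2 ∧ p.2 < (wN:Int) ∧
        PySem.List.pyGetD (PySem.List.pyGetD grid p.1 []) p.2 0 ≠ 1 then
      ((List.range hN).map (fun r => (List.range wN).map (g r))).modify p.1.toNat
        (fun row => row.set p.2.toNat 'G')
    else ((List.range hN).map (fun r => (List.range wN).map (g r))))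
  = (List.range hN).map (fun (r : Nat) => (List.range wN).map (fun (c : Nat) =>
      if p == ((r : Int), (c : Int)) && !((grid.getD r []).getD c 0 == 1) then 'G' else g r c)) := by
  split_ifs with hguard
  · obtain ⟨h1, h2, h3, h4, h5⟩ := hguard
    obtain ⟨ρ, hρ⟩ : ∃ ρ : Nat, p.1 = (ρ : Int) := ⟨p.1.toNat, (Int.toNat_of_nonneg h1).symm⟩
    obtain ⟨κ, hκ⟩ : ∃ κ : Nat, p.2 = (κ : Int) := ⟨p.2.toNat, (Int.toNat_of_nonneg h3).symm⟩
    rw [hρ, hκ] at h5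
    simp only [PySem.List.pyGetD_natCast] at h5
    have htn1 : p.1.toNat = ρ := by rw [hρ]; simp
    have htn2 : p.2.toNat = κ := by rw [hκ]; simp
    rw [pv_map_range_modify, htn1, htn2]
    apply List.map_congr_left
    intro r hr
    by_cases hrρ : r = ρ
    · rw [if_pos hrρ, pv_map_range_set]
      apply List.map_congr_left
      intro c hc
      by_cases hcκ : c = κ
      · have hcond : (p == ((r : Int), (c : Int)) && !((grid.getD r []).getD c 0 == 1)) = true :=
          (pv_cond_true_iff grid p r c).mpr
            ⟨Prod.ext_iff.mpr ⟨by rw [hρ, hrρ], by rw [hκ, hcκ]⟩, by rw [hrρ, hcκ]; exact h5⟩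
        rw [if_pos hcκ, hcond]
        simp
      · have hcond : (p == ((r : Int), (c : Int)) && !((grid.getD r []).getD c 0 == 1)) = false := by
          rw [Bool.eq_false_iff, Ne, pv_cond_true_iff]
          rintro ⟨he, -⟩
          exact hcκ (by have := congrArg Prod.snd he; simp [hκ] at this; omega)
        rw [if_neg hcκ, hcond]
        simp
    · rw [if_neg hrρ]
      apply List.map_congr_left
      intro c hc
      have hcond : (p == ((r : Int), (c : Int)) && !((grid.getD r []).getD c 0 == 1)) = false := by
        rw [Bool.eq_false_iff, Ne, pv_cond_true_iff]
        rintro ⟨he, -⟩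
        exact hrρ (by have := congrArg Prod.fst he; simp [hρ] at this; omega)
      rw [hcond]
      simp
  · apply List.map_congr_left
    intro r hr
    apply List.map_congr_left
    intro c hc
    simp only [List.mem_range] at hr hc
    have hcond : (p == ((r : Int), (c : Int)) && !((grid.getD r []).getD c 0 == 1)) = false := by
      rw [Bool.eq_false_iff, Ne, pv_cond_true_iff]
      rintro ⟨he, hne⟩
      apply hguard
      subst he
      refine ⟨by simp, by simpa using hr, by simp, by simpa using hc, ?_⟩
      simpa [PySem.List.pyGetD_natCast] using hne
    rw [hcond]
    simp

lemma pv_any_and_const {α : Type} (l : List α) (q : α → Bool) (b : Bool) :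
    (l.any fun p => q p && b) = (l.any q && b) := by
  cases b <;> simp

lemma pv_map_eq_range_map {α β : Type} (l : List α) (d : α) (f : α → β) :
    l.map f = (List.range l.length).map (fun i => f (l.getD i d)) := by
  apply List.ext_getElem (by simp)
  intro i h1 h2
  simp at h1
  simp [List.getElem_map, List.getElem_range, List.getElem?_eq_getElem h1]

lemma pv_overlay (grid : List (List Int)) (hN wN : Nat) (pts : List (Int × Int)) :
    ∀ (g : Nat → Nat → Char),
    pts.foldl (fun b p => if 0 ≤ p.1 ∧ p.1 < (hN:Int) ∧ 0 ≤ p.2 ∧ p.2 < (wN:Int) ∧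
        PySem.List.pyGetD (PySem.List.pyGetD grid p.1 []) p.2 0 ≠ 1 then
        b.modify p.1.toNat (fun row => row.set p.2.toNat 'G') else b)
      ((List.range hN).map (fun r => (List.range wN).map (g r)))
  = (List.range hN).map (fun (r : Nat) => (List.range wN).map (fun (c : Nat) =>
      if pts.any (fun p => p == ((r : Int), (c : Int)) && !((grid.getD r []).getD c 0 == 1))
      then 'G' else g r c)) := by
  induction pts with
  | nil => intro g; simp
  | cons p pts ih =>
    intro g
    rw [List.foldl_cons, pv_step grid hN wN g p, ih]
    apply List.map_congr_left
    intro r hr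
    apply List.map_congr_left
    intro c hc
    rw [List.any_cons]
    cases hb : (p == ((r : Int), (c : Int)) && !((grid.getD r []).getD c 0 == 1)) <;>
      cases hb2 : (pts.any fun p => p == ((r : Int), (c : Int)) && !((grid.getD r []).getD c 0 == 1)) <;>
        simp [*]

lemma pv_main (grid : List (List Int)) (items : List (Int × Int)) :
    build_char_map_from_grid_py grid items = build_char_map_from_grid_py_alt grid items := by
  simp only [build_char_map_from_grid_py, build_char_map_from_grid_py_alt, PySem.List.len_eq,
    PySem.List.pyRange_zero_nat, List.map_map, Function.comp_def, PySem.List.pyGetD_natCast]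
  rw [pv_map_eq_range_map grid [] (fun row => List.map (fun x => if row.getD x 0 = 1 then '#' else '.') (List.range (PySem.List.pyGetD grid 0 []).length))]
  have hov := pv_overlay grid grid.length (PySem.List.pyGetD grid 0 []).length items
      (fun r c => if (grid.getD r []).getD c 0 = 1 then '#' else '.')
  refine Eq.trans ?_ (congrArg (List.map (fun row => String.mk row)) hov.symm)
  rw [List.map_map]
  apply List.map_congr_left
  intro r hr
  simp only [Function.comp_def]
  apply congrArg String.mk
  apply List.map_congr_left
  intro c hc
  rw [pv_any_and_const items (fun p => p == ((r : Int), (c : Int)))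
      (!((grid.getD r []).getD c 0 == 1))]
  by_cases hcell : (grid.getD r []).getD c 0 = 1
  · simp only [List.getD_eq_getElem?_getD] at hcell
    simp [hcell]
  · simp only [List.getD_eq_getElem?_getD] at hcell
    by_cases hmem : ((r : Int), (c : Int)) ∈ items
    · simp [List.any_eq_true, PySem.Set.mem_ofList, hcell, hmem]
    · simp [List.any_eq_true, PySem.Set.mem_ofList, hcell, hmem]

-- ===== VERDICT (by name: the statement is the Claim_ definition above) =====
theorem build_char_map_from_grid_py_spec : Claim_equal_build_char_map_from_grid_py := by
  intro grid items _ _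
  exact pv_main grid items
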